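-- pv_equiv track=rewrite | github.com/AliAtaollahi/Tinification | Joern/sliceCfg.py | reverse_dfs_multi
-- ===== SOURCE A (Python) =====
-- def reverse_dfs_multi(starts, incoming):
--     visited = set()
--     stack = list(starts)
--     while stack:
--         n = stack.pop()
--         if n in visited:
--             continue
--         visited.add(n)
--         for pred in incoming.get(n, []):
--             if pred not in visited:
--                 stack.append(pred)
--     return visited
-- ===== SOURCE B (Python) =====
-- def reverse_dfs_multi(starts, incoming):
--     # Recursive DFS over predecessors: the call stack replaces A's explicit stack.
--     # Children are taken in reversed order, which keeps A's exploration order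
--     # (the returned set is identical either way).
--     visited = set()
--
--     def visit(n):
--         if n in visited:
--             return
--         visited.add(n)
--         for pred in reversed(incoming.get(n, ())):
--             visit(pred)
--
--     for s in reversed(starts):
--         visit(s)
--     return visited
-- ===== Notes on version B (the rewrite author's own statement) =====
-- stated objective: alternative
-- what changed: Replaces A's explicit worklist stack (with deferred visited-checks on pop) by a recursive visit helper that checks on entry and recurses over incoming.get(n, ()), using the call stack instead of an explicit one.
import Mathlib
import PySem

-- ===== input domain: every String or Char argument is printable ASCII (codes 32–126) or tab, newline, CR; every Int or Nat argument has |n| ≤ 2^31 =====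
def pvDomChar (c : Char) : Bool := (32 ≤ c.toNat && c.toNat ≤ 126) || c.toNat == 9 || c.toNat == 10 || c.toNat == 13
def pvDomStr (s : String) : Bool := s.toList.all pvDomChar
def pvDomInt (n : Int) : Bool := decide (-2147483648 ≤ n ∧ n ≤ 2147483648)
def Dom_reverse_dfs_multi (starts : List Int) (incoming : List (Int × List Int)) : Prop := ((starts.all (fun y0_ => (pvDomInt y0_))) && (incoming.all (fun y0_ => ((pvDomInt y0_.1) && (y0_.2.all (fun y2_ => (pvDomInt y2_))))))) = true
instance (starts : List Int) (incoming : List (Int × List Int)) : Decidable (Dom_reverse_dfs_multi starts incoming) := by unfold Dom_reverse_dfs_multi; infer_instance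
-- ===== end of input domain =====

-- B replaces A's explicit worklist stack by a recursive visit helper over predecessors
-- (same reachable set; objective: alternative decomposition, same asymptotic cost).


-- incoming.get(n, []) — shared lookup primitive (Python dict.get)
def pvDfsPreds (incoming : List (Int × List Int)) (n : Int) : List Int :=
  PySem.Dict.getD (PySem.Dict.mk incoming) n []

-- ===== PORT A =====
-- The while-loop; the stack is kept TOP-FIRST: Python's append/pop at the right end
-- become cons/uncons at the head here (exact). Fuel only makes the loop total; the
-- proof shows the supplied fuel always suffices.
def pvLoopA (incoming : List (Int × List Int)) : Nat → PySem.Set Int → List Int → PySem.Set Int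
  | 0, visited, _ => visited
  | _ + 1, visited, [] => visited
  | f + 1, visited, n :: stack =>
    if PySem.Set.contains visited n then
      pvLoopA incoming f visited stack
    else
      let visited' := PySem.Set.add visited n
      pvLoopA incoming f visited'
        ((pvDfsPreds incoming n).foldl
          (fun st pred => if PySem.Set.contains visited' pred then st else pred :: st) stack)

def reverse_dfs_multi (starts : List Int) (incoming : List (Int × List Int)) : List Int :=
  pvLoopA incoming (starts.length + (incoming.map (fun p => p.2.length)).sum + 1)
    PySem.Set.empty starts.reverse

-- ===== PORT B =====
-- every node that can ever be visited (fuel bound for the recursion)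
def pvNodes (starts : List Int) (incoming : List (Int × List Int)) : List Int :=
  starts ++ incoming.flatMap (fun p => p.1 :: p.2)

-- the recursive helper visit(n); fuel only makes the recursion total
def pvVisitB (incoming : List (Int × List Int)) : Nat → PySem.Set Int → Int → PySem.Set Int
  | 0, visited, _ => visited
  | f + 1, visited, n =>
    if PySem.Set.contains visited n then visited
    else
      (pvDfsPreds incoming n).reverse.foldl
        (fun v pred => pvVisitB incoming f v pred) (PySem.Set.add visited n)

def reverse_dfs_multi_alt (starts : List Int) (incoming : List (Int × List Int)) : List Int :=
  starts.reverse.foldl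
    (fun v s => pvVisitB incoming ((pvNodes starts incoming).length + 1) v s)
    PySem.Set.empty

-- ===== PRECONDITION & SPEC =====
def Spec_reverse_dfs_multi (starts : List Int) (incoming : List (Int × List Int)) (out : List Int) : Prop := out = reverse_dfs_multi_alt starts incoming
instance (starts : List Int) (incoming : List (Int × List Int)) (out : List Int) : Decidable (Spec_reverse_dfs_multi starts incoming out) := by unfold Spec_reverse_dfs_multi; infer_instance

-- ===== CLAIM (what is proved, stated in full; the proofs are below) =====
def Claim_equal_reverse_dfs_multi : Prop := ∀ (starts : List Int) (incoming : List (Int × List Int)), Dom_reverse_dfs_multi starts incoming → Spec_reverse_dfs_multi starts incoming (reverse_dfs_multi starts incoming)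

-- ===== LEMMAS AND PROOFS =====

-- |U \ visited| : the recursion measure of B
def pvK (U : List Int) (v : PySem.Set Int) : Nat :=
  (U.filter (fun x => !PySem.Set.contains v x)).length

-- remaining pushes A can still perform : part of the loop measure of A
def pvPot (l : List (Int × List Int)) (v : PySem.Set Int) : Nat :=
  ((l.filter (fun p => !PySem.Set.contains v p.1)).map (fun p => p.2.length)).sum

lemma pvDfsPreds_cons (k : Int) (ws : List Int) (t : List (Int × List Int)) (n : Int) :
    pvDfsPreds ((k, ws) :: t) n = if k == n then ws else pvDfsPreds t n := by
  simp only [pvDfsPreds, PySem.Dict.getD_eq_get?_getD, PySem.Dict.get?_mk_cons]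
  split <;> rfl

lemma pvPreds_sub (l : List (Int × List Int)) (n x : Int) (h : x ∈ pvDfsPreds l n) :
    x ∈ l.flatMap (fun p => p.1 :: p.2) := by
  induction l with
  | nil => simp [pvDfsPreds, PySem.Dict.getD, PySem.Dict.get?] at h
  | cons p t ih =>
    obtain ⟨k, ws⟩ := p
    rw [pvDfsPreds_cons] at h
    simp only [List.flatMap_cons, List.mem_append, List.mem_cons]
    by_cases hk : k == n
    · simp [hk] at h; tauto
    · simp [hk] at h; right; exact ih h

lemma pv_foldl_pres {α : Type} (g : PySem.Set Int → α → PySem.Set Int) (x : Int)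
    (hg : ∀ v a, x ∈ v → x ∈ g v a) :
    ∀ (ws : List α) (v : PySem.Set Int), x ∈ v → x ∈ ws.foldl g v := by
  intro ws
  induction ws with
  | nil => intro v h; exact h
  | cons w ws ih => intro v h; exact ih _ (hg _ _ h)

lemma pvVisitB_mono (incoming : List (Int × List Int)) :
    ∀ (f : Nat) (v : PySem.Set Int) (n x : Int), x ∈ v → x ∈ pvVisitB incoming f v n := by
  intro f
  induction f with
  | zero => intro v n x h; exact h
  | succ f ih =>
    intro v n x h
    rw [pvVisitB]
    split
    · exact h
    · exact pv_foldl_pres _ x (fun v a hx => ih v a x hx) _ _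
        (by rw [PySem.Set.mem_add]; left; exact h)

lemma pv_contains_eq (v : PySem.Set Int) (x : Int) : PySem.Set.contains v x = decide (x ∈ v) := by
  simp

lemma pv_filter_length_mono (p q : Int → Bool) (h : ∀ x, p x = true → q x = true) :
    ∀ (U : List Int), (U.filter p).length ≤ (U.filter q).length := by
  intro U
  induction U with
  | nil => simp
  | cons u t ih =>
    simp only [List.filter_cons]
    by_cases hp : p u = true
    · rw [if_pos hp, if_pos (h u hp)]
      simpa using ih
    · rw [if_neg hp]
      split
      · exact le_trans ih (by simp)
      · exact ih

lemma pvK_anti (U : List Int) (v w : PySem.Set Int) (h : ∀ x, x ∈ v → x ∈ w) :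
    pvK U w ≤ pvK U v := by
  apply pv_filter_length_mono
  intro x hx
  simp only [pv_contains_eq, Bool.not_eq_eq_eq_not, Bool.not_true, decide_eq_false_iff_not] at hx ⊢
  exact fun hv => hx (h x hv)

lemma pvK_le (U : List Int) (v : PySem.Set Int) : pvK U v ≤ U.length :=
  List.length_filter_le _ _

lemma pvK_add_lt (U : List Int) (v : PySem.Set Int) (n : Int) (hU : n ∈ U) (hv : n ∉ v) :
    pvK U (PySem.Set.add v n) < pvK U v := by
  have hanti : ∀ t : List Int, pvK t (PySem.Set.add v n) ≤ pvK t v := fun t =>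
    pvK_anti t v (PySem.Set.add v n) (fun x hx => by rw [PySem.Set.mem_add]; left; exact hx)
  induction U with
  | nil => simp at hU
  | cons u t ih =>
    simp only [pvK, List.filter_cons, pv_contains_eq]
    by_cases hu : u = n
    · subst hu
      rw [if_neg (by simp [PySem.Set.mem_add]), if_pos (by simp [hv])]
      have := hanti t
      simp only [pvK, pv_contains_eq] at this
      simp only [List.length_cons]
      omega
    · have hcc : (decide (u ∈ PySem.Set.add v n)) = (decide (u ∈ v)) := by
        simp [PySem.Set.mem_add, hu]
      rw [show (!decide (u ∈ PySem.Set.add v n)) = (!decide (u ∈ v)) from by rw [hcc]]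
      have hmem : n ∈ t := by
        rcases List.mem_cons.mp hU with h | h
        · exact absurd h.symm hu
        · exact h
      have := ih hmem
      simp only [pvK, pv_contains_eq] at this
      by_cases hc : u ∈ v
      · rw [if_neg (by simp [hc]), if_neg (by simp [hc])]
        exact this
      · rw [if_pos (by simp [hc]), if_pos (by simp [hc])]
        simp only [List.length_cons]
        omega

lemma pvVisitB_fuel (incoming : List (Int × List Int)) (U : List Int)
    (hpred : ∀ n x, x ∈ pvDfsPreds incoming n → x ∈ U) :
    ∀ (m f g : Nat) (v : PySem.Set Int) (n : Int), n ∈ U → pvK U v ≤ m →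
      pvK U v < f → pvK U v < g → pvVisitB incoming f v n = pvVisitB incoming g v n := by
  intro m
  induction m with
  | zero =>
    intro f g v n hn hm hf hg
    obtain ⟨f, rfl⟩ : ∃ f', f = f' + 1 := ⟨f - 1, by omega⟩
    obtain ⟨g, rfl⟩ : ∃ g', g = g' + 1 := ⟨g - 1, by omega⟩
    rw [pvVisitB, pvVisitB]
    by_cases hc : PySem.Set.contains v n
    · rw [if_pos hc, if_pos hc]
    · have hv : n ∉ v := by simpa [pv_contains_eq] using hc
      have := pvK_add_lt U v n hn hv
      omega
  | succ m ih =>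
    intro f g v n hn hm hf hg
    obtain ⟨f, rfl⟩ : ∃ f', f = f' + 1 := ⟨f - 1, by omega⟩
    obtain ⟨g, rfl⟩ : ∃ g', g = g' + 1 := ⟨g - 1, by omega⟩
    rw [pvVisitB, pvVisitB]
    by_cases hc : PySem.Set.contains v n
    · rw [if_pos hc, if_pos hc]
    · rw [if_neg hc, if_neg hc]
      have hv : n ∉ v := by simpa [pv_contains_eq] using hc
      have hklt := pvK_add_lt U v n hn hv
      have hws : ∀ x ∈ (pvDfsPreds incoming n).reverse, x ∈ U := fun x hx =>
        hpred n x (List.mem_reverse.mp hx)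
      have H : ∀ (ws : List Int) (v0 : PySem.Set Int), (∀ x ∈ ws, x ∈ U) →
          pvK U v0 ≤ m → pvK U v0 < f → pvK U v0 < g →
          ws.foldl (fun v p => pvVisitB incoming f v p) v0
            = ws.foldl (fun v p => pvVisitB incoming g v p) v0 := by
        intro ws
        induction ws with
        | nil => intro v0 _ _ _ _; rfl
        | cons w ws ihw =>
          intro v0 h0 hm0 hf0 hg0
          simp only [List.foldl_cons]
          rw [ih f g v0 w (h0 w List.mem_cons_self) hm0 hf0 hg0]
          have hmono : ∀ x, x ∈ v0 → x ∈ pvVisitB incoming g v0 w := fun x hx =>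
            pvVisitB_mono incoming g v0 w x hx
          have hKle := pvK_anti U v0 _ hmono
          exact ihw _ (fun x hx => h0 x (List.mem_cons_of_mem _ hx)) (by omega) (by omega) (by omega)
      exact H _ _ hws (by omega) (by omega) (by omega)

lemma pvFold_fuel (incoming : List (Int × List Int)) (U : List Int)
    (hpred : ∀ n x, x ∈ pvDfsPreds incoming n → x ∈ U) (f g : Nat) :
    ∀ (ws : List Int) (v : PySem.Set Int), (∀ x ∈ ws, x ∈ U) →
      pvK U v < f → pvK U v < g →
      ws.foldl (fun v p => pvVisitB incoming f v p) v
        = ws.foldl (fun v p => pvVisitB incoming g v p) v := by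
  intro ws
  induction ws with
  | nil => intro v _ _ _; rfl
  | cons w ws ihw =>
    intro v h0 hf hg
    simp only [List.foldl_cons]
    rw [pvVisitB_fuel incoming U hpred (pvK U v) f g v w (h0 w List.mem_cons_self) le_rfl hf hg]
    have hKle := pvK_anti U v _ (fun x hx => pvVisitB_mono incoming g v w x hx)
    exact ihw _ (fun x hx => h0 x (List.mem_cons_of_mem _ hx)) (by omega) (by omega)

lemma pvPush_eq (v' : PySem.Set Int) :
    ∀ (preds st : List Int),
      preds.foldl (fun st pred => if PySem.Set.contains v' pred then st else pred :: st) st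
        = (preds.filter (fun p => !PySem.Set.contains v' p)).reverse ++ st := by
  intro preds
  induction preds with
  | nil => intro st; rfl
  | cons p ps ih =>
    intro st
    simp only [List.foldl_cons, List.filter_cons]
    by_cases hc : PySem.Set.contains v' p
    · rw [if_pos hc, if_neg (by simpa [pv_contains_eq] using hc), ih]
    · rw [if_neg hc, if_pos (by simpa [pv_contains_eq] using hc), ih]
      simp [List.append_assoc]

lemma pvPot_anti (l : List (Int × List Int)) (v w : PySem.Set Int) (h : ∀ x, x ∈ v → x ∈ w) :
    pvPot l w ≤ pvPot l v := by
  induction l with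
  | nil => simp [pvPot]
  | cons p t ih =>
    simp only [pvPot, List.filter_cons, pv_contains_eq] at ih ⊢
    by_cases hw : p.1 ∈ w
    · rw [if_neg (by simp [hw])]
      by_cases hc : p.1 ∈ v
      · rw [if_neg (by simp [hc])]
        exact ih
      · rw [if_pos (by simp [hc])]
        simp only [List.map_cons, List.sum_cons]
        omega
    · have hcv : p.1 ∉ v := fun hv => hw (h _ hv)
      rw [if_pos (by simp [hw]), if_pos (by simp [hcv])]
      simp only [List.map_cons, List.sum_cons]
      omega

lemma pvPot_getD (l : List (Int × List Int)) (v : PySem.Set Int) (n : Int) (hv : n ∉ v) :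
    (pvDfsPreds l n).length + pvPot l (PySem.Set.add v n) ≤ pvPot l v := by
  have hanti : ∀ t, pvPot t (PySem.Set.add v n) ≤ pvPot t v := fun t =>
    pvPot_anti t v _ (fun x hx => by rw [PySem.Set.mem_add]; left; exact hx)
  induction l with
  | nil => simp [pvDfsPreds, PySem.Dict.getD, PySem.Dict.get?, pvPot]
  | cons p t ih =>
    obtain ⟨k, ws⟩ := p
    rw [pvDfsPreds_cons]
    simp only [pvPot, List.filter_cons, pv_contains_eq]
    by_cases hk : k == n
    · have hkn : k = n := by simpa using hk
      subst hkn
      rw [if_pos hk, if_neg (by simp [PySem.Set.mem_add]), if_pos (by simp [hv])]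
      have := hanti t
      simp only [pvPot, pv_contains_eq] at this
      simp only [List.map_cons, List.sum_cons]
      omega
    · have hkn : ¬ k = n := by simpa using hk
      rw [if_neg hk]
      have hcc : (decide (k ∈ PySem.Set.add v n)) = (decide (k ∈ v)) := by
        simp [PySem.Set.mem_add, hkn]
      rw [show (!decide (k ∈ PySem.Set.add v n)) = (!decide (k ∈ v)) from by rw [hcc]]
      simp only [pvPot, pv_contains_eq] at ih
      by_cases hc : k ∈ v
      · rw [if_neg (by simp [hc]), if_neg (by simp [hc])]
        exact ih
      · rw [if_pos (by simp [hc]), if_pos (by simp [hc])]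
        simp only [List.map_cons, List.sum_cons]
        omega

lemma pvSkip (incoming : List (Int × List Int)) (NB : Nat) (v' : PySem.Set Int) :
    ∀ (ws : List Int) (v : PySem.Set Int), (∀ x, x ∈ v' → x ∈ v) →
      ws.foldl (fun v p => pvVisitB incoming (NB + 1) v p) v
        = (ws.filter (fun p => !PySem.Set.contains v' p)).foldl
            (fun v p => pvVisitB incoming (NB + 1) v p) v := by
  intro ws
  induction ws with
  | nil => intro v _; rfl
  | cons w ws ih =>
    intro v hsub
    simp only [List.foldl_cons, List.filter_cons]
    by_cases hc : PySem.Set.contains v' w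
    · rw [if_neg (by simpa [pv_contains_eq] using hc)]
      have hwv : w ∈ v := hsub w (by simpa [pv_contains_eq] using hc)
      have : pvVisitB incoming (NB + 1) v w = v := by
        rw [pvVisitB, if_pos (by simpa [pv_contains_eq] using hwv)]
      rw [this]
      exact ih v hsub
    · rw [if_pos (by simpa [pv_contains_eq] using hc)]
      simp only [List.foldl_cons]
      exact ih _ (fun x hx => pvVisitB_mono incoming _ v w x (hsub x hx))

lemma pvBridge (starts : List Int) (incoming : List (Int × List Int)) :
    ∀ (f : Nat) (v : PySem.Set Int) (s : List Int),
      (∀ x ∈ s, x ∈ pvNodes starts incoming) →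
      s.length + pvPot incoming v < f →
      pvLoopA incoming f v s
        = s.foldl
            (fun v n => pvVisitB incoming ((pvNodes starts incoming).length + 1) v n) v := by
  intro f
  induction f with
  | zero => intro v s _ h; omega
  | succ f ih =>
    intro v s hsub hΦ
    match s with
    | [] => rfl
    | n :: rest =>
      rw [pvLoopA]
      simp only [List.foldl_cons]
      by_cases hc : PySem.Set.contains v n
      · rw [if_pos hc]
        have hvis : pvVisitB incoming ((pvNodes starts incoming).length + 1) v n = v := by
          rw [pvVisitB, if_pos hc]
        rw [hvis]
        exact ih v rest (fun x hx => hsub x (List.mem_cons_of_mem _ hx))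
          (by simp at hΦ; omega)
      · rw [if_neg hc]
        have hv : n ∉ v := by simpa [pv_contains_eq] using hc
        have hnU : n ∈ pvNodes starts incoming := hsub n List.mem_cons_self
        have hpred : ∀ n x, x ∈ pvDfsPreds incoming n → x ∈ pvNodes starts incoming :=
          fun n x hx => List.mem_append.mpr (Or.inr (pvPreds_sub incoming n x hx))
        set U := pvNodes starts incoming with hU
        set v' := PySem.Set.add v n with hv'
        rw [pvPush_eq]
        have hpot := pvPot_getD incoming v n hv
        rw [← hv'] at hpot
        have hflen : ((pvDfsPreds incoming n).filter (fun p => !PySem.Set.contains v' p)).length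
            ≤ (pvDfsPreds incoming n).length := List.length_filter_le _ _
        rw [ih v' _ (by
          intro x hx
          rcases List.mem_append.mp hx with h | h
          · exact hpred n x (List.mem_filter.mp (List.mem_reverse.mp h)).1
          · exact hsub x (List.mem_cons_of_mem _ h)) (by
          simp only [List.length_append, List.length_reverse]
          simp only [List.length_cons] at hΦ
          omega)]
        rw [List.foldl_append]
        congr 1
        -- visit NB v n equals the fold over the pushed (filtered, reversed) predecessors
        have hvnv : n ∈ v' := by rw [hv', PySem.Set.mem_add]; right; rfl
        rw [pvVisitB, if_neg hc]
        have hKv' : pvK U v' < U.length := lt_of_lt_of_le (pvK_add_lt U v n hnU hv) (pvK_le U v)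
        rw [pvFold_fuel incoming U hpred U.length (U.length + 1) (pvDfsPreds incoming n).reverse v'
          (fun x hx => hpred n x (List.mem_reverse.mp hx)) hKv' (by omega)]
        rw [pvSkip incoming U.length v' (pvDfsPreds incoming n).reverse v' (fun x hx => hx)]
        rw [← List.filter_reverse]

-- ===== VERDICT (by name: the statement is the Claim_ definition above) =====
theorem reverse_dfs_multi_spec : Claim_equal_reverse_dfs_multi := by
  intro starts incoming _
  unfold Spec_reverse_dfs_multi reverse_dfs_multi reverse_dfs_multi_alt
  apply pvBridge
  · intro x hx
    rw [List.mem_reverse] at hx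
    exact List.mem_append.mpr (Or.inl hx)
  · have hpot : pvPot incoming PySem.Set.empty = (incoming.map (fun p => p.2.length)).sum := by
      simp [pvPot, PySem.Set.empty, PySem.Set.contains]
    rw [List.length_reverse, hpot]
    omega
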